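-- pv_equiv track=rewrite | github.com/SukhmKang/pdf-chat-staged | pdf_layout_parser.py | _clean_table_data
-- ===== SOURCE A (Python) =====
-- from typing import List, Dict, Any, Optional
--
-- def _clean_table_data(table_data: List[List[str]]) -> List[List[str]]:
--     """Clean table data by removing empty rows and columns."""
--     if not table_data:
--         return []
--
--     # First, convert None values to empty strings and ensure all cells are strings
--     sanitized_data = []
--     for row in table_data:
--         if row is None:
--             continue
--         sanitized_row = []
--         for cell in row:
--             if cell is None:
--                 sanitized_row.append("")
--             elif isinstance(cell, str):
--                 sanitized_row.append(cell)
--             else: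
--                 sanitized_row.append(str(cell))
--         sanitized_data.append(sanitized_row)
--
--     if not sanitized_data:
--         return []
--
--     # Remove completely empty rows
--     cleaned_rows = []
--     for row in sanitized_data:
--         if any(cell and cell.strip() for cell in row):
--             cleaned_rows.append(row)
--
--     if not cleaned_rows:
--         return []
--
--     # Remove completely empty columns
--     max_cols = max(len(row) for row in cleaned_rows)
--
--     # Pad all rows to same length
--     for row in cleaned_rows:
--         while len(row) < max_cols:
--             row.append("")
--
--     # Find non-empty columns
--     non_empty_cols = []
--     for col_idx in range(max_cols):
--         if any(row[col_idx] and row[col_idx].strip() for row in cleaned_rows):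
--             non_empty_cols.append(col_idx)
--
--     # Keep only non-empty columns
--     if non_empty_cols:
--         final_data = []
--         for row in cleaned_rows:
--             cleaned_row = [row[col_idx] for col_idx in non_empty_cols]
--             final_data.append(cleaned_row)
--         return final_data
--
--     return cleaned_rows
-- ===== SOURCE B (Python) =====
-- def _clean_table_data(table_data):
--     """Clean table data by removing empty rows and columns (transpose-based)."""
--     rows = [
--         ["" if cell is None else cell if isinstance(cell, str) else str(cell)
--          for cell in row]
--         for row in table_data
--         if row is not None
--     ]
--     rows = [row for row in rows if any(cell.strip() for cell in row)]
--     if not rows: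
--         return []
--     width = max(len(row) for row in rows)
--     columns = [[row[i] if i < len(row) else "" for row in rows] for i in range(width)]
--     kept = [col for col in columns if any(cell.strip() for cell in col)]
--     return [[col[j] for col in kept] for j in range(len(rows))]
-- ===== Notes on version B (the rewrite author's own statement) =====
-- stated objective: alternative
-- what changed: B filters non-empty rows in one comprehension, builds the column lists explicitly (padding ragged rows on the fly instead of mutating rows in place), keeps the non-empty columns, and transposes back, instead of A's index-list bookkeeping over padded rows.
import Mathlib
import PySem

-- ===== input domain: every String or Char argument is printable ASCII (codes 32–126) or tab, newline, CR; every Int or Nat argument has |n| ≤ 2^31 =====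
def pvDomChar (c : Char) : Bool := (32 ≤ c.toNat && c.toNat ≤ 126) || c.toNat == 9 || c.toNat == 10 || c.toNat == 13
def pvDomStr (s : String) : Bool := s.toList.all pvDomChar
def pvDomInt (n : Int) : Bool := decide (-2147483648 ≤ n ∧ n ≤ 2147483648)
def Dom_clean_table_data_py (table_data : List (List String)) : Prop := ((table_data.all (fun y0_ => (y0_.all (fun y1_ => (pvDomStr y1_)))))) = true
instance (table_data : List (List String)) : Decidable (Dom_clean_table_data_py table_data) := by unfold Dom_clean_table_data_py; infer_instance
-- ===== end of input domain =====

-- B removes empty rows/columns by building the column lists and transposing, instead of A's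
-- in-place padding plus index-list bookkeeping; same cost, alternative structure. Return-value
-- equivalence only (A pads its own fresh row copies, so the input is not mutated by either).

-- ===== PORT A =====
-- the 'while len(row) < max_cols: row.append("")' padding loop
def padRowA (m : Nat) (r : List String) : List String :=
  if r.length < m then padRowA m (r ++ [""]) else r
termination_by m - r.length
decreasing_by simp_all; omega

-- Under the List (List String) typing, rows are never None and every cell is a str, so the
-- sanitize loop always takes the `isinstance(cell, str)` branch.  row[col_idx] is ported as
-- List.getD _ "" — exact here because every index used is < the padded row length.
def clean_table_data_py (table_data : List (List String)) : List (List String) :=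
  if table_data = [] then [] else
  let sanitized := table_data.foldl (fun acc row =>
    acc ++ [row.foldl (fun r c => r ++ [c]) []]) []
  if sanitized = [] then [] else
  let cleaned := sanitized.foldl (fun acc row =>
    if row.any (fun c => decide (c ≠ "") && decide (PySem.Str.strip c ≠ "")) then acc ++ [row] else acc) []
  if cleaned = [] then [] else
  let maxCols := (PySem.List.max? (cleaned.map List.length) (fun x => x)).getD 0
  let padded := cleaned.map (padRowA maxCols)
  let nonEmptyCols := (List.range maxCols).foldl (fun acc i =>
    if padded.any (fun row => decide (row.getD i "" ≠ "") && decide (PySem.Str.strip (row.getD i "") ≠ "")) then acc ++ [i] else acc) []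
  if nonEmptyCols ≠ [] then
    padded.foldl (fun acc row => acc ++ [nonEmptyCols.map (fun i => row.getD i "")]) []
  else padded

-- ===== PORT B =====
-- cells are always str under this typing, so B's sanitize comprehension maps each cell to itself;
-- col[j] with j < len(col) is ported as List.getD _ "".
def clean_table_data_py_alt (table_data : List (List String)) : List (List String) :=
  let rows0 := table_data.map (fun row => row.map (fun c => c))
  let rows := rows0.filter (fun row => row.any (fun c => decide (PySem.Str.strip c ≠ "")))
  if rows = [] then [] else
  let width := (PySem.List.max? (rows.map List.length) (fun x => x)).getD 0
  let columns := (List.range width).map (fun i => rows.map (fun r => if i < r.length then r.getD i "" else ""))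
  let kept := columns.filter (fun col => col.any (fun c => decide (PySem.Str.strip c ≠ "")))
  (List.range rows.length).map (fun j => kept.map (fun col => col.getD j ""))

-- ===== PRECONDITION & SPEC =====
def Spec_clean_table_data_py (table_data : List (List String)) (out : List (List String)) : Prop := out = clean_table_data_py_alt table_data
instance (table_data : List (List String)) (out : List (List String)) : Decidable (Spec_clean_table_data_py table_data out) := by unfold Spec_clean_table_data_py; infer_instance

-- ===== CLAIM (what is proved, stated in full; the proofs are below) =====
def Claim_equal_clean_table_data_py : Prop := ∀ (table_data : List (List String)), Dom_clean_table_data_py table_data → Spec_clean_table_data_py table_data (clean_table_data_py table_data)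

-- ===== LEMMAS AND PROOFS =====

-- a non-blank strip means the cell itself is non-empty, so A's `cell and cell.strip()` test
-- coincides with B's `cell.strip()`
lemma and_strip_eq (c : String) :
    (decide (c ≠ "") && decide (PySem.Str.strip c ≠ "")) = decide (PySem.Str.strip c ≠ "") := by
  by_cases h : c = ""
  · subst h; decide
  · simp [h]

lemma padRowA_eq (m : Nat) (r : List String) :
    padRowA m r = r ++ List.replicate (m - r.length) "" := by
  unfold padRowA
  split
  · rename_i h
    rw [padRowA_eq m (r ++ [""])]
    have : m - r.length = (m - (r.length + 1)) + 1 := by omega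
    simp [this, List.replicate_succ]
  · rename_i h
    have : m - r.length = 0 := by omega
    simp [this]
termination_by m - r.length
decreasing_by simp_all; omega

lemma getD_append_replicate (r : List String) (k i : Nat) :
    (r ++ List.replicate k "").getD i "" = r.getD i "" := by
  induction r generalizing i with
  | nil =>
    cases i with
    | zero => cases k <;> simp [List.replicate_succ]
    | succ j =>
      cases k with
      | zero => simp
      | succ k' => simp [List.replicate_succ]
  | cons a t ih =>
    cases i with
    | zero => simp
    | succ j => simpa using ih j

lemma getD_padRowA (m : Nat) (r : List String) (i : Nat) :
    (padRowA m r).getD i "" = r.getD i "" := by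
  rw [padRowA_eq]; exact getD_append_replicate r _ i

-- mapping over range l.length and indexing is just mapping over l
lemma range_map_getD {β : Type} (l : List (List String)) (F : List String → β) :
    (List.range l.length).map (fun j => F (l.getD j [])) = l.map F := by
  induction l with
  | nil => simp
  | cons a t ih =>
    have hr : List.range (t.length + 1) = 0 :: (List.range t.length).map Nat.succ := by
      simpa using List.range_succ_eq_map (n := t.length)
    simp only [List.length_cons, hr, List.map_cons, List.map_map]
    exact congrArg (F a :: ·) (ih)

theorem clean_table_data_py_equal (table_data : List (List String)) :
    clean_table_data_py table_data = clean_table_data_py_alt table_data := by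
  simp only [clean_table_data_py, clean_table_data_py_alt]
  -- sanitize is the identity on both sides
  have hsan : table_data.foldl (fun acc row => acc ++ [row.foldl (fun r c => r ++ [c]) []]) []
      = table_data := by
    have : ∀ (row : List String), row.foldl (fun r c => r ++ [c]) [] = row := fun row => by
      simpa using PySem.List.foldl_append_singleton row []
    calc table_data.foldl (fun acc row => acc ++ [row.foldl (fun r c => r ++ [c]) []]) []
        = table_data.map (fun row => row.foldl (fun r c => r ++ [c]) []) := by
          simpa using PySem.List.foldl_append_if (fun _ => true)
            (fun row => row.foldl (fun r c => r ++ [c]) []) table_data []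
      _ = table_data := by simp [this]
  have hrows0 : table_data.map (fun row => row.map (fun c => c)) = table_data := by simp
  set p : List String → Bool := fun row => row.any (fun c => decide (PySem.Str.strip c ≠ "")) with hp
  have hclean : table_data.foldl (fun acc row =>
      if row.any (fun c => decide (c ≠ "") && decide (PySem.Str.strip c ≠ "")) then acc ++ [row] else acc) []
      = table_data.filter p := by
    have hpr : ∀ row : List String,
        row.any (fun c => decide (c ≠ "") && decide (PySem.Str.strip c ≠ "")) = p row := by
      intro row; simp only [hp]
      exact PySem.List.any_congr_mem (fun c _ => and_strip_eq c)
    calc _ = table_data.foldl (fun acc row => if p row then acc ++ [row] else acc) [] := by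
          simp only [hpr]
      _ = (table_data.filter p).map id := by
          simpa using PySem.List.foldl_append_if p id table_data []
      _ = table_data.filter p := by simp
  rw [hsan, hrows0, hclean]
  set rows := table_data.filter p with hrowsdef
  by_cases hnil : table_data = []
  · subst hnil; simp [rows]
  · simp only [if_neg hnil]
    by_cases hre : rows = []
    · simp [hre]
    · simp only [if_neg hre]
      set m := (PySem.List.max? (rows.map List.length) (fun x => x)).getD 0 with hm
      -- padding vanishes under getD with default ""
      have hpadget : ∀ (r : List String) (i : Nat), (padRowA m r).getD i "" = r.getD i "" :=
        fun r i => getD_padRowA m r i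
      -- A's non-empty-column predicate and B's coincide
      set q : Nat → Bool := fun i => rows.any (fun r => decide (PySem.Str.strip (r.getD i "") ≠ "")) with hq
      have hcolpred : ∀ i : Nat,
          (rows.map (padRowA m)).any (fun row =>
            decide (row.getD i "" ≠ "") && decide (PySem.Str.strip (row.getD i "") ≠ "")) = q i := by
        intro i
        rw [List.any_map]
        simp only [hq]
        refine PySem.List.any_congr_mem (fun r _ => ?_)
        simp only [Function.comp, hpadget r i]
        exact and_strip_eq _
      have hcols : (List.range m).foldl (fun acc i =>
          if (rows.map (padRowA m)).any (fun row =>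
            decide (row.getD i "" ≠ "") && decide (PySem.Str.strip (row.getD i "") ≠ "")) then acc ++ [i] else acc) []
          = (List.range m).filter q := by
        calc _ = (List.range m).foldl (fun acc i => if q i then acc ++ [i] else acc) [] := by
              simp only [hcolpred]
          _ = ((List.range m).filter q).map id := by
              simpa using PySem.List.foldl_append_if q id (List.range m) []
          _ = (List.range m).filter q := by simp
      rw [hcols]
      set keptIdx := (List.range m).filter q with hkid
      -- keptIdx is non-empty: the first kept row has a non-blank cell, whose index is < m
      have hkne : keptIdx ≠ [] := by
        obtain ⟨r, tl, hcons⟩ := List.exists_cons_of_ne_nil hre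
        have hrmem : r ∈ rows := by rw [hcons]; exact List.mem_cons_self
        have hpr : p r = true := List.of_mem_filter (by rw [← hrowsdef]; exact hrmem)
        simp only [hp, List.any_eq_true] at hpr
        obtain ⟨c, hcmem, hcs⟩ := hpr
        obtain ⟨j, hj, hcj⟩ := List.getElem_of_mem hcmem
        have hlem : r.length ≤ m := by
          cases hmax : PySem.List.max? (rows.map List.length) (fun x => x) with
          | none => exact absurd ((PySem.List.max?_eq_none_iff _ _).1 hmax) (by simp [hre])
          | some mx =>
            have := PySem.List.max?_isMax hmax r.length (List.mem_map_of_mem hrmem)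
            simp only [hm, hmax, Option.getD_some]
            exact this
        have hjq : q j = true := by
          simp only [hq, List.any_eq_true]
          refine ⟨r, hrmem, ?_⟩
          have : r.getD j "" = c := by rw [List.getD_eq_getElem r "" hj, hcj]
          rw [this]; exact hcs
        intro hke
        have : j ∈ keptIdx := by
          rw [hkid]
          exact List.mem_filter.2 ⟨List.mem_range.2 (lt_of_lt_of_le hj hlem), hjq⟩
        rw [hke] at this; exact absurd this (List.not_mem_nil)
      rw [if_pos hkne]
      -- A's final fold is a map over rows
      have hAfin : (rows.map (padRowA m)).foldl (fun acc row => acc ++ [keptIdx.map (fun i => row.getD i "")]) []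
          = rows.map (fun r => keptIdx.map (fun i => r.getD i "")) := by
        calc _ = (rows.map (padRowA m)).map (fun row => keptIdx.map (fun i => row.getD i "")) := by
              simpa using PySem.List.foldl_append_if (fun _ => true)
                (fun row => keptIdx.map (fun i => row.getD i "")) (rows.map (padRowA m)) []
          _ = rows.map (fun r => keptIdx.map (fun i => (padRowA m r).getD i "")) := by
              rw [List.map_map]; rfl
          _ = _ := by
              refine List.map_congr_left (fun r _ => ?_)
              exact List.map_congr_left (fun i _ => hpadget r i)
      rw [hAfin]
      -- B's columns: filter over mapped range = map over filtered range
      have hifget : ∀ (r : List String) (i : Nat),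
          (if i < r.length then r.getD i "" else "") = r.getD i "" := by
        intro r i
        split
        · rfl
        · rename_i h; rw [List.getD_eq_default r "" (by omega)]
      have hcolsimp : (List.range m).map (fun i => rows.map (fun r => if i < r.length then r.getD i "" else ""))
          = (List.range m).map (fun i => rows.map (fun r => r.getD i "")) := by
        refine List.map_congr_left (fun i _ => ?_)
        exact List.map_congr_left (fun r _ => hifget r i)
      rw [hcolsimp]
      have hfiltmap : ((List.range m).map (fun i => rows.map (fun r => r.getD i ""))).filter
            (fun col => col.any (fun c => decide (PySem.Str.strip c ≠ "")))
          = (keptIdx).map (fun i => rows.map (fun r => r.getD i "")) := by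
        rw [List.filter_map, hkid]
        congr 1
        refine List.filter_congr (fun i _ => ?_)
        simp only [Function.comp, hq]
        rw [List.any_map]
        rfl
      rw [hfiltmap]
      -- B's back-transpose row j picks rows[j] from every kept column
      have hgetcol : ∀ (i j : Nat),
          ((rows.map (fun r => r.getD i "")).getD j "") = (rows.getD j []).getD i "" := by
        intro i j
        by_cases hj : j < rows.length
        · rw [List.getD_eq_getElem _ _ (by simpa using hj), List.getD_eq_getElem _ _ hj,
            List.getElem_map]
        · rw [List.getD_eq_default _ _ (by simpa using not_lt.1 hj),
            List.getD_eq_default _ _ (not_lt.1 hj)]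
          simp
      calc rows.map (fun r => keptIdx.map (fun i => r.getD i ""))
          = (List.range rows.length).map (fun j =>
              keptIdx.map (fun i => (rows.getD j []).getD i "")) := by
            rw [range_map_getD rows (fun r => keptIdx.map (fun i => r.getD i ""))]
        _ = (List.range rows.length).map (fun j =>
              (keptIdx.map (fun i => rows.map (fun r => r.getD i ""))).map (fun col => col.getD j "")) := by
            refine List.map_congr_left (fun j _ => ?_)
            rw [List.map_map]
            refine List.map_congr_left (fun i _ => ?_)
            simp only [Function.comp]
            rw [hgetcol i j]

-- ===== VERDICT (by name: the statement is the Claim_ definition above) =====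
theorem clean_table_data_py_spec : Claim_equal_clean_table_data_py := by
  intro table_data _
  unfold Spec_clean_table_data_py
  exact clean_table_data_py_equal table_data
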